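-- pv_equiv track=rewrite | github.com/JosephOIbrahim/Synapse | python/synapse/routing/context_enrichment.py | get_group_for_tool
-- ===== SOURCE A (Python) =====
-- from typing import Dict, List, Optional, Any
--
-- def get_group_for_tool(tool_name: str) -> Optional[str]:
--     """Resolve which tool group a tool belongs to.
--
--     Returns the group name (e.g. 'render', 'usd') or None if unknown.
--     Uses prefix heuristics — no import of tool group modules required.
--     """
--     _PREFIX_MAP = {
--         "tops_": "tops",
--         "houdini_render": "render",
--         "houdini_capture": "render",
--         "houdini_set_keyframe": "render",
--         "houdini_render_settings": "render",
--         "houdini_stage_info": "usd",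
--         "houdini_get_usd": "usd",
--         "houdini_set_usd": "usd",
--         "houdini_create_usd": "usd",
--         "houdini_modify_usd": "usd",
--         "houdini_reference_usd": "usd",
--         "houdini_query_prims": "usd",
--         "houdini_manage_variant": "usd",
--         "houdini_manage_collection": "usd",
--         "houdini_configure_light": "usd",
--         "houdini_create_material": "usd",
--         "houdini_create_textured": "usd",
--         "houdini_assign_material": "usd",
--         "houdini_read_material": "usd",
--         "houdini_hda_": "memory",
--         "synapse_knowledge": "memory",
--         "synapse_context": "memory",
--         "synapse_search": "memory",
--         "synapse_recall": "memory",
--         "synapse_decide": "memory",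
--         "synapse_add_memory": "memory",
--         "synapse_project_setup": "memory",
--         "synapse_memory_": "memory",
--         "synapse_evolve_memory": "memory",
--         "synapse_metrics": "memory",
--         "synapse_router_stats": "memory",
--         "synapse_list_recipes": "memory",
--         "synapse_live_metrics": "memory",
--         "synapse_validate_frame": "render",
--         "synapse_configure_render": "render",
--         "synapse_render_": "render",
--         "synapse_autonomous_render": "render",
--         "synapse_validate_ordering": "render",
--     }
--
--     # Check exact matches first, then prefix matches
--     for prefix, group in sorted(_PREFIX_MAP.items(), key=lambda x: -len(x[0])):
--         if tool_name.startswith(prefix):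
--             return group
--
--     # Default: scene group for houdini_* and synapse_* tools not matched above
--     if tool_name.startswith(("houdini_", "synapse_")):
--         return "scene"
--
--     return None
-- ===== SOURCE B (Python) =====
-- from typing import Dict, List, Optional
--
-- # Inverted table: group -> its tool-name prefixes; flattened once at import.
-- _GROUPS: Dict[str, List[str]] = {
--     "tops": ["tops_"],
--     "render": [
--         "houdini_render", "houdini_capture", "houdini_set_keyframe",
--         "houdini_render_settings", "synapse_validate_frame",
--         "synapse_configure_render", "synapse_render_",
--         "synapse_autonomous_render", "synapse_validate_ordering",
--     ],
--     "usd": [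
--         "houdini_stage_info", "houdini_get_usd", "houdini_set_usd",
--         "houdini_create_usd", "houdini_modify_usd", "houdini_reference_usd",
--         "houdini_query_prims", "houdini_manage_variant",
--         "houdini_manage_collection", "houdini_configure_light",
--         "houdini_create_material", "houdini_create_textured",
--         "houdini_assign_material", "houdini_read_material",
--     ],
--     "memory": [
--         "houdini_hda_", "synapse_knowledge", "synapse_context",
--         "synapse_search", "synapse_recall", "synapse_decide",
--         "synapse_add_memory", "synapse_project_setup", "synapse_memory_",
--         "synapse_evolve_memory", "synapse_metrics", "synapse_router_stats",
--         "synapse_list_recipes", "synapse_live_metrics",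
--     ],
-- }
--
-- _PREFIX_MAP: Dict[str, str] = {}
-- for _group, _prefixes in _GROUPS.items():
--     for _p in _prefixes:
--         _PREFIX_MAP[_p] = _group
--
-- _MAX_PREFIX_LEN = max(len(k) for k in _PREFIX_MAP)
--
--
-- def get_group_for_tool(tool_name: str) -> Optional[str]:
--     """Resolve which tool group a tool belongs to.
--
--     Probes the prefix map with tool_name's own prefixes, longest first,
--     so the first hit is the longest match.
--     """
--     for i in range(min(len(tool_name), _MAX_PREFIX_LEN), 0, -1):
--         group = _PREFIX_MAP.get(tool_name[:i])
--         if group is not None: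
--             return group
--
--     if tool_name.startswith(("houdini_", "synapse_")):
--         return "scene"
--
--     return None
-- ===== Notes on version B (the rewrite author's own statement) =====
-- stated objective: alternative
-- what changed: A builds the prefix->group dict, length-sorts all 38 prefixes and tests each with startswith on every call; B flattens an inverted group->prefixes table once at module import into a prefix map and answers each call by looking up the input's own prefixes in that map from the longest relevant length downward, returning the first hit (the longest match).
import Mathlib
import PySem

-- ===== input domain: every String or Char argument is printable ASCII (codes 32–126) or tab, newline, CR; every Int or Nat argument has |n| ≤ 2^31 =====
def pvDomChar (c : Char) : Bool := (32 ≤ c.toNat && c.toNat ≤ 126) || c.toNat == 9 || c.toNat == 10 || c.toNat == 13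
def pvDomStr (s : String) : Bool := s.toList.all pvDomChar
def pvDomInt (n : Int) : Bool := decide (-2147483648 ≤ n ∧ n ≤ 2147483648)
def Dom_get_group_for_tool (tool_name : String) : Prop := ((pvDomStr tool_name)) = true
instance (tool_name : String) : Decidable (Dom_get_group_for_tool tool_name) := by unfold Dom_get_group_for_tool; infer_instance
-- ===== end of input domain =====

-- B replaces A's per-call dict build, length-sort and scan of all 38 prefixes by a module-level
-- map (flattened once from an inverted group->prefixes table) probed with the input's own prefixes, longest
-- first (alternative algorithm, same results).


-- ===== PORT A =====
-- the dict literal _PREFIX_MAP built inside A (insertion order)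
def pvMapA : PySem.Dict String String := PySem.Dict.ofList [
  ("tops_", "tops"),
  ("houdini_render", "render"),
  ("houdini_capture", "render"),
  ("houdini_set_keyframe", "render"),
  ("houdini_render_settings", "render"),
  ("houdini_stage_info", "usd"),
  ("houdini_get_usd", "usd"),
  ("houdini_set_usd", "usd"),
  ("houdini_create_usd", "usd"),
  ("houdini_modify_usd", "usd"),
  ("houdini_reference_usd", "usd"),
  ("houdini_query_prims", "usd"),
  ("houdini_manage_variant", "usd"),
  ("houdini_manage_collection", "usd"),
  ("houdini_configure_light", "usd"),
  ("houdini_create_material", "usd"),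
  ("houdini_create_textured", "usd"),
  ("houdini_assign_material", "usd"),
  ("houdini_read_material", "usd"),
  ("houdini_hda_", "memory"),
  ("synapse_knowledge", "memory"),
  ("synapse_context", "memory"),
  ("synapse_search", "memory"),
  ("synapse_recall", "memory"),
  ("synapse_decide", "memory"),
  ("synapse_add_memory", "memory"),
  ("synapse_project_setup", "memory"),
  ("synapse_memory_", "memory"),
  ("synapse_evolve_memory", "memory"),
  ("synapse_metrics", "memory"),
  ("synapse_router_stats", "memory"),
  ("synapse_list_recipes", "memory"),
  ("synapse_live_metrics", "memory"),
  ("synapse_validate_frame", "render"),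
  ("synapse_configure_render", "render"),
  ("synapse_render_", "render"),
  ("synapse_autonomous_render", "render"),
  ("synapse_validate_ordering", "render")]

-- the 'for prefix, group in …: if tool_name.startswith(prefix): return group' loop
def pvScanA (tool_name : String) : List (String × String) → Option String
  | [] => none
  | (p, g) :: rest =>
    if PySem.Str.startswith tool_name p then some g else pvScanA tool_name rest

def get_group_for_tool (tool_name : String) : Option String :=
  match pvScanA tool_name
      (PySem.List.sorted pvMapA.items (fun x => -(PySem.Str.len x.1))) with
  | some g => some g
  | none =>
    if PySem.Str.startswith tool_name "houdini_" || PySem.Str.startswith tool_name "synapse_" then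
      some "scene"
    else none

-- ===== PORT B =====
-- the module-level _GROUPS literal of Source B: group -> its prefixes
def pvGroups : List (String × List String) := [
  ("tops", ["tops_"]),
  ("render", [
    "houdini_render", "houdini_capture", "houdini_set_keyframe",
    "houdini_render_settings", "synapse_validate_frame",
    "synapse_configure_render", "synapse_render_",
    "synapse_autonomous_render", "synapse_validate_ordering"]),
  ("usd", [
    "houdini_stage_info", "houdini_get_usd", "houdini_set_usd",
    "houdini_create_usd", "houdini_modify_usd", "houdini_reference_usd",
    "houdini_query_prims", "houdini_manage_variant",
    "houdini_manage_collection", "houdini_configure_light",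
    "houdini_create_material", "houdini_create_textured",
    "houdini_assign_material", "houdini_read_material"]),
  ("memory", [
    "houdini_hda_", "synapse_knowledge", "synapse_context",
    "synapse_search", "synapse_recall", "synapse_decide",
    "synapse_add_memory", "synapse_project_setup", "synapse_memory_",
    "synapse_evolve_memory", "synapse_metrics", "synapse_router_stats",
    "synapse_list_recipes", "synapse_live_metrics"])]

-- module-level flatten loop of Source B: for group, prefixes in _GROUPS: for p in prefixes: map[p] = group
def pvMapB : PySem.Dict String String :=
  pvGroups.foldl (fun d gp =>
    gp.2.foldl (fun d p => d.insert p gp.1) d)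
    PySem.Dict.empty

-- _MAX_PREFIX_LEN = max(len(k) for k in _PREFIX_MAP); the flattened map is nonempty, so Python's
-- max returns; '.getD 0' / '.toNat' are only the total Lean forms of that value
def pvMaxPrefixLen : Nat :=
  ((PySem.List.max? (pvMapB.keys.map (fun k => PySem.Str.len k)) (fun x => x)).getD 0).toNat

-- 'for i in range(min(len(tool_name), _MAX_PREFIX_LEN), 0, -1): …' with early return
def pvProbeB (tool_name : String) : Nat → Option String
  | 0 => none
  | i + 1 =>
    let group := pvMapB.get? (PySem.Str.slice tool_name none (some ((i + 1 : Nat) : Int)))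
    if group.isSome then group else pvProbeB tool_name i

def get_group_for_tool_alt (tool_name : String) : Option String :=
  match pvProbeB tool_name (min (PySem.Str.len tool_name).toNat pvMaxPrefixLen) with
  | some g => some g
  | none =>
    if PySem.Str.startswith tool_name "houdini_" || PySem.Str.startswith tool_name "synapse_" then
      some "scene"
    else none

-- ===== PRECONDITION & SPEC =====
def Spec_get_group_for_tool (tool_name : String) (out : Option String) : Prop := out = get_group_for_tool_alt tool_name
instance (tool_name : String) (out : Option String) : Decidable (Spec_get_group_for_tool tool_name out) := by unfold Spec_get_group_for_tool; infer_instance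

-- ===== CLAIM (what is proved, stated in full; the proofs are below) =====
def Claim_equal_get_group_for_tool : Prop := ∀ (tool_name : String), Dom_get_group_for_tool tool_name → Spec_get_group_for_tool tool_name (get_group_for_tool tool_name)

-- ===== LEMMAS AND PROOFS =====

-- the parsed map, evaluated once into a literal (proof-only helper)
def pvLitB : List (String × String) := [
  ("tops_", "tops"),
  ("houdini_render", "render"),
  ("houdini_capture", "render"),
  ("houdini_set_keyframe", "render"),
  ("houdini_render_settings", "render"),
  ("synapse_validate_frame", "render"),
  ("synapse_configure_render", "render"),
  ("synapse_render_", "render"),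
  ("synapse_autonomous_render", "render"),
  ("synapse_validate_ordering", "render"),
  ("houdini_stage_info", "usd"),
  ("houdini_get_usd", "usd"),
  ("houdini_set_usd", "usd"),
  ("houdini_create_usd", "usd"),
  ("houdini_modify_usd", "usd"),
  ("houdini_reference_usd", "usd"),
  ("houdini_query_prims", "usd"),
  ("houdini_manage_variant", "usd"),
  ("houdini_manage_collection", "usd"),
  ("houdini_configure_light", "usd"),
  ("houdini_create_material", "usd"),
  ("houdini_create_textured", "usd"),
  ("houdini_assign_material", "usd"),
  ("houdini_read_material", "usd"),
  ("houdini_hda_", "memory"),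
  ("synapse_knowledge", "memory"),
  ("synapse_context", "memory"),
  ("synapse_search", "memory"),
  ("synapse_recall", "memory"),
  ("synapse_decide", "memory"),
  ("synapse_add_memory", "memory"),
  ("synapse_project_setup", "memory"),
  ("synapse_memory_", "memory"),
  ("synapse_evolve_memory", "memory"),
  ("synapse_metrics", "memory"),
  ("synapse_router_stats", "memory"),
  ("synapse_list_recipes", "memory"),
  ("synapse_live_metrics", "memory")]

set_option maxRecDepth 1000000 in
theorem pvB_items_lit : pvMapB.items = pvLitB := rfl

set_option maxRecDepth 1000000 in
theorem pv_perm : pvMapB.items.Perm pvMapA.items := by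
  rw [pvB_items_lit]
  decide

theorem pv_mem_iff (pg : String × String) : pg ∈ pvMapB.items ↔ pg ∈ pvMapA.items :=
  pv_perm.mem_iff

set_option maxRecDepth 1000000 in
theorem pv_nodup_keys : pvMapB.keys.Nodup := by
  simp only [PySem.Dict.keys]
  rw [pvB_items_lit]
  decide

set_option maxRecDepth 1000000 in
theorem pv_len_bounds : ∀ pg ∈ pvMapA.items, 1 ≤ pg.1.toList.length ∧ pg.1.toList.length ≤ 25 := by decide

set_option maxRecDepth 1000000 in
theorem pv_maxlen : pvMaxPrefixLen = 25 := by
  unfold pvMaxPrefixLen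
  simp only [PySem.Dict.keys]
  rw [pvB_items_lit]
  decide

theorem pvScanA_eq_find? (s : String) (l : List (String × String)) :
    pvScanA s l = (l.find? (fun pg => PySem.Str.startswith s pg.1)).map Prod.snd := by
  induction l with
  | nil => rfl
  | cons pg rest ih =>
    obtain ⟨p, g⟩ := pg
    simp only [pvScanA, List.find?_cons]
    cases hc : PySem.Str.startswith s p with
    | true => simp
    | false => simp [ih]

theorem pv_startswith_iff (s p : String) :
    PySem.Str.startswith s p = true ↔ p.toList <+: s.toList := by
  rw [PySem.Str.startswith_eq]; exact PySem.Chars.startswith_iff _ _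

theorem pv_slice_toList (s : String) (k : Nat) :
    (PySem.Str.slice s none (some (k : Int))).toList = s.toList.take k := by
  rw [PySem.Str.toList_slice]
  simp [PySem.Chars.slice_eq_listSlice, PySem.List.slice_to_natCast]

set_option maxRecDepth 1000000 in
theorem pv_probe_none (s : String)
    (h : ∀ pg ∈ pvMapA.items, ¬ (pg.1.toList <+: s.toList)) :
    ∀ n, pvProbeB s n = none := by
  intro n
  induction n with
  | zero => rfl
  | succ i ih =>
    cases hg : pvMapB.get? (PySem.Str.slice s none (some ((i + 1 : Nat) : Int))) with
    | some g =>
      exfalso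
      have hm := (pv_mem_iff _).mp (PySem.Dict.mem_items_of_get?_eq_some _ hg)
      exact h _ hm (by rw [pv_slice_toList]; exact List.take_prefix _ _)
    | none => unfold pvProbeB; rw [hg]; exact ih

set_option maxRecDepth 1000000 in
theorem pv_probe_hit (s g : String) (k : Nat) (hk1 : 1 ≤ k)
    (hget : pvMapB.get? (PySem.Str.slice s none (some (k : Int))) = some g)
    (habove : ∀ i, k < i → i ≤ s.toList.length →
      pvMapB.get? (PySem.Str.slice s none (some (i : Int))) = none) :
    ∀ m, k + m ≤ s.toList.length → pvProbeB s (k + m) = some g := by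
  intro m
  induction m with
  | zero =>
    intro _
    obtain ⟨k', rfl⟩ : ∃ k', k = k' + 1 := ⟨k - 1, by omega⟩
    unfold pvProbeB; rw [hget]; rfl
  | succ m ih =>
    intro h
    have hz := habove (k + m + 1) (by omega) (by omega)
    have : k + (m + 1) = (k + m) + 1 := by omega
    rw [this]
    unfold pvProbeB
    rw [hz]
    exact ih (by omega)

set_option maxRecDepth 1000000 in
theorem pv_main (s : String) : get_group_for_tool s = get_group_for_tool_alt s := by
  unfold get_group_for_tool get_group_for_tool_alt
  rw [pvScanA_eq_find?]
  have hnval : min (PySem.Str.len s).toNat pvMaxPrefixLen = min s.toList.length 25 := by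
    rw [pv_maxlen, PySem.Str.len_eq]; simp
  cases hf : (PySem.List.sorted pvMapA.items (fun x => -(PySem.Str.len x.1))).find?
      (fun pg => PySem.Str.startswith s pg.1) with
  | none =>
    have hno : ∀ pg ∈ pvMapA.items, ¬ (pg.1.toList <+: s.toList) := by
      intro pg hm hpre
      have hmL : pg ∈ PySem.List.sorted pvMapA.items (fun x => -(PySem.Str.len x.1)) :=
        (PySem.List.mem_sorted _ _ _ _).mpr hm
      exact List.find?_eq_none.mp hf pg hmL ((pv_startswith_iff s pg.1).mpr hpre)
    rw [pv_probe_none s hno _]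
    rfl
  | some pg =>
    obtain ⟨p, g⟩ := pg
    obtain ⟨hpred, l₁, l₂, hL, hl₁⟩ := List.find?_eq_some_iff_append.mp hf
    have hpre : p.toList <+: s.toList := (pv_startswith_iff s p).mp hpred
    have hmem : (p, g) ∈ pvMapA.items := by
      have : (p, g) ∈ PySem.List.sorted pvMapA.items (fun x => -(PySem.Str.len x.1)) := by
        rw [hL]; simp
      exact (PySem.List.mem_sorted _ _ _ _).mp this
    have hpair := PySem.List.sorted_pairwise pvMapA.items (fun x => -(PySem.Str.len x.1))
    rw [hL] at hpair
    have hmax : ∀ q h', (q, h') ∈ pvMapA.items → q.toList <+: s.toList →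
        q.toList.length ≤ p.toList.length := by
      intro q h' hm hq
      have hmL : (q, h') ∈ l₁ ++ (p, g) :: l₂ := by
        rw [← hL]; exact (PySem.List.mem_sorted _ _ _ _).mpr hm
      rcases List.mem_append.mp hmL with h1 | h2
      · exact absurd ((pv_startswith_iff s q).mpr hq) (by simpa using hl₁ _ h1)
      · rcases List.mem_cons.mp h2 with he | h3
        · cases he; exact le_refl _
        · have hle := (List.pairwise_cons.mp (List.pairwise_append.mp hpair).2.1).1 _ h3
          simp only [PySem.Str.len_eq] at hle
          omega
    have hb : 1 ≤ p.toList.length ∧ p.toList.length ≤ 25 := pv_len_bounds (p, g) hmem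
    have hkle : p.toList.length ≤ s.toList.length := hpre.length_le
    have hget : pvMapB.get? (PySem.Str.slice s none (some ((p.toList.length : Nat) : Int))) = some g := by
      have hkey : PySem.Str.slice s none (some ((p.toList.length : Nat) : Int)) = p := by
        apply String.toList_inj.mp
        rw [pv_slice_toList]
        exact (List.prefix_iff_eq_take.mp hpre).symm
      rw [hkey]
      exact PySem.Dict.get?_of_mem_items _ ((pv_mem_iff _).mpr hmem) pv_nodup_keys
    have habove : ∀ i, p.toList.length < i → i ≤ s.toList.length →
        pvMapB.get? (PySem.Str.slice s none (some (i : Int))) = none := by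
      intro i hki his
      cases hg2 : pvMapB.get? (PySem.Str.slice s none (some (i : Int))) with
      | none => rfl
      | some h' =>
        exfalso
        have hm2 := (pv_mem_iff _).mp (PySem.Dict.mem_items_of_get?_eq_some _ hg2)
        have hpre2 : (PySem.Str.slice s none (some (i : Int))).toList <+: s.toList := by
          rw [pv_slice_toList]; exact List.take_prefix _ _
        have hlen : (PySem.Str.slice s none (some (i : Int))).toList.length = i := by
          rw [pv_slice_toList, List.length_take]; omega
        have := hmax _ _ hm2 hpre2
        omega
    rw [hnval, show min s.toList.length 25 = p.toList.length + (min s.toList.length 25 - p.toList.length) from by omega]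
    rw [pv_probe_hit s g p.toList.length hb.1 hget habove _ (by omega)]
    rfl

-- ===== VERDICT (by name: the statement is the Claim_ definition above) =====
theorem get_group_for_tool_spec : Claim_equal_get_group_for_tool := by
  intro t _
  unfold Spec_get_group_for_tool
  exact pv_main t
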